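-- pv_equiv track=rewrite | github.com/zhiqix/NL2GQL | Deal_middle.py | schema_list_map
-- ===== SOURCE A (Python) =====
-- def schema_list_map(schema_list, map_node, map_edge):
--     # Filter and concatenate from the map
--
--     new_schema = "# This is the partial schema of the graph\n"
--     new_schema += '# Nodes\n'
--     total_node = 0
--     total_edge = 0
--
--     for i in schema_list:
--         i = str(i).lower()
--         if i in map_node:
--             new_schema += map_node[i] + "\n"
--             total_node += 1
--     new_schema += '# Edges\n'
--     for i in schema_list:
--         i = str(i).lower()
--         if i in map_edge:
--             new_schema += map_edge[i] + "\n"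
--             total_edge += 1
--
--     if total_node + total_edge < len(schema_list) or (total_node == 0 or total_node == 0):
--         # There are incorrect classes in the list
--         return None
--
--     return new_schema
-- ===== SOURCE B (Python) =====
-- def schema_list_map(schema_list, map_node, map_edge):
--     node_lines, edge_lines = [], []
--     for i in schema_list:
--         key = str(i).lower()
--         if key in map_node:
--             node_lines.append(map_node[key])
--         if key in map_edge:
--             edge_lines.append(map_edge[key])
--     total_node, total_edge = len(node_lines), len(edge_lines)
--     if total_node + total_edge < len(schema_list) or total_node == 0:
--         return None
--     return ("# This is the partial schema of the graph\n# Nodes\n"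
--             + "".join(l + "\n" for l in node_lines)
--             + "# Edges\n"
--             + "".join(l + "\n" for l in edge_lines))
-- ===== Notes on version B (the rewrite author's own statement) =====
-- stated objective: simpler
-- what changed: One fused pass over schema_list collecting matched node and edge lines into two lists, then a single join-based assembly, instead of two separate loops each growing the result string by repeated concatenation.
import Mathlib
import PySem

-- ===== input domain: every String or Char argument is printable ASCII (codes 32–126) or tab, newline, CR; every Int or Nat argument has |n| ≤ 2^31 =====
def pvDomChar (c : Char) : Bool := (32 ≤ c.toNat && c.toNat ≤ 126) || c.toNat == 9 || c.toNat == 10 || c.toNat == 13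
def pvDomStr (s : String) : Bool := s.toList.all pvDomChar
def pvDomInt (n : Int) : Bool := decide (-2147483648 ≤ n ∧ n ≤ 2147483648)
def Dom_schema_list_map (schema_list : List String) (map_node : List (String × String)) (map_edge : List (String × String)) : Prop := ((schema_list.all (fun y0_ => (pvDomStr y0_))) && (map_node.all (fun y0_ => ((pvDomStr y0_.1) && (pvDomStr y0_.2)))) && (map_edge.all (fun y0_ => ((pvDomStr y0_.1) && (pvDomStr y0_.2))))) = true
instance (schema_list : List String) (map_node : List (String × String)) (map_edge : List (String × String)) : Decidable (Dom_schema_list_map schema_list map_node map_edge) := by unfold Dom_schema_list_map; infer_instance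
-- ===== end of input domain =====

-- B fuses the two loops into a single pass collecting two line lists and assembles the
-- result with joins (objective: simpler); return values proved equal everywhere on Dom.

-- ===== PORT A =====
def schema_list_map (schema_list : List String) (map_node : List (String × String)) (map_edge : List (String × String)) : Option String :=
  let new_schema := "# This is the partial schema of the graph\n" ++ "# Nodes\n"
  let st1 := schema_list.foldl (fun (st : String × Int) i =>
      let j := PySem.Str.lower i
      match map_node.lookup j with
      | some v => (st.1 ++ v ++ "\n", st.2 + 1)
      | none => st) (new_schema, 0)
  let s2 := st1.1 ++ "# Edges\n"
  let st2 := schema_list.foldl (fun (st : String × Int) i =>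
      let j := PySem.Str.lower i
      match map_edge.lookup j with
      | some v => (st.1 ++ v ++ "\n", st.2 + 1)
      | none => st) (s2, 0)
  if st1.2 + st2.2 < (schema_list.length : Int) ∨ st1.2 = 0 ∨ st1.2 = 0 then none
  else some st2.1

-- ===== PORT B =====
def schema_list_map_alt (schema_list : List String) (map_node : List (String × String)) (map_edge : List (String × String)) : Option String :=
  let p := schema_list.foldl (fun (st : List String × List String) i =>
      let k := PySem.Str.lower i
      let st1 := match map_node.lookup k with
        | some v => (st.1 ++ [v], st.2)
        | none => st
      match map_edge.lookup k with
      | some v => (st1.1, st1.2 ++ [v])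
      | none => st1) ([], [])
  if p.1.length + p.2.length < schema_list.length ∨ p.1.length = 0 then none
  else some ("# This is the partial schema of the graph\n" ++ "# Nodes\n" ++
    String.join (p.1.map (· ++ "\n")) ++ "# Edges\n" ++ String.join (p.2.map (· ++ "\n")))

-- ===== PRECONDITION & SPEC =====
def Spec_schema_list_map (schema_list : List String) (map_node : List (String × String)) (map_edge : List (String × String)) (out : Option String) : Prop := out = schema_list_map_alt schema_list map_node map_edge
instance (schema_list : List String) (map_node : List (String × String)) (map_edge : List (String × String)) (out : Option String) : Decidable (Spec_schema_list_map schema_list map_node map_edge out) := by unfold Spec_schema_list_map; infer_instance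

-- ===== CLAIM (what is proved, stated in full; the proofs are below) =====
def Claim_equal_schema_list_map : Prop := ∀ (schema_list : List String) (map_node : List (String × String)) (map_edge : List (String × String)), Dom_schema_list_map schema_list map_node map_edge → Spec_schema_list_map schema_list map_node map_edge (schema_list_map schema_list map_node map_edge)

-- ===== LEMMAS AND PROOFS =====

/-- The matched values of one map over the list, in order. -/
def mVals (m : List (String × String)) (sl : List String) : List String :=
  sl.filterMap (fun i => m.lookup (PySem.Str.lower i))

theorem foldl_str (l : List String) (a b : String) :
    List.foldl (fun r s => r ++ s) (a ++ b) l = a ++ List.foldl (fun r s => r ++ s) b l := by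
  induction l generalizing b with
  | nil => rfl
  | cons x xs ih => simp only [List.foldl_cons, String.append_assoc]; exact ih (b ++ x)

theorem join_cons (x : String) (xs : List String) :
    String.join (x :: xs) = x ++ String.join xs := by
  simpa [String.join] using foldl_str xs x ""

theorem foldA_eq (m : List (String × String)) (sl : List String) (s : String) (t : Int) :
    sl.foldl (fun (st : String × Int) i =>
      let j := PySem.Str.lower i
      match m.lookup j with
      | some v => (st.1 ++ v ++ "\n", st.2 + 1)
      | none => st) (s, t)
    = (s ++ String.join ((mVals m sl).map (· ++ "\n")), t + ((mVals m sl).length : Int)) := by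
  induction sl generalizing s t with
  | nil => simp [mVals, String.join]
  | cons x xs ih =>
    simp only [List.foldl_cons, mVals, List.filterMap_cons]
    cases h : m.lookup (PySem.Str.lower x) with
    | none => simpa [mVals] using ih s t
    | some v =>
      rw [ih]
      simp only [mVals, List.map_cons, join_cons, Prod.mk.injEq]
      exact ⟨by simp [String.append_assoc], by push_cast [List.length_cons]; ring⟩

theorem foldB_eq (mn me : List (String × String)) (sl : List String) (ln le : List String) :
    sl.foldl (fun (st : List String × List String) i =>
      let k := PySem.Str.lower i
      let st1 := match mn.lookup k with
        | some v => (st.1 ++ [v], st.2)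
        | none => st
      match me.lookup k with
      | some v => (st1.1, st1.2 ++ [v])
      | none => st1) (ln, le)
    = (ln ++ mVals mn sl, le ++ mVals me sl) := by
  induction sl generalizing ln le with
  | nil => simp [mVals]
  | cons x xs ih =>
    simp only [List.foldl_cons, mVals, List.filterMap_cons]
    cases hn : mn.lookup (PySem.Str.lower x) <;>
      cases he : me.lookup (PySem.Str.lower x) <;>
        simp [ih, mVals]

-- ===== VERDICT (by name: the statement is the Claim_ definition above) =====
theorem schema_list_map_spec : Claim_equal_schema_list_map := by
  intro sl mn me _
  simp only [Spec_schema_list_map, schema_list_map, schema_list_map_alt]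
  rw [foldA_eq, foldA_eq, foldB_eq]
  have hcond : ((0 : Int) + ((mVals mn sl).length : Int) + (0 + ((mVals me sl).length : Int)) < (sl.length : Int)
      ∨ (0 : Int) + ((mVals mn sl).length : Int) = 0 ∨ (0 : Int) + ((mVals mn sl).length : Int) = 0)
      ↔ (([] ++ mVals mn sl).length + ([] ++ mVals me sl).length < sl.length ∨ ([] ++ mVals mn sl).length = 0) := by
    simp only [List.nil_append]; omega
  split_ifs with h1 h2 h2 <;>
    first
      | rfl
      | exact absurd (hcond.mp h1) h2
      | exact absurd (hcond.mpr h2) h1
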